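-- pv_equiv track=rewrite | github.com/JeffersonLab/clas12-dc-wiremap | dc_wire_map.py | superlayer
-- ===== SOURCE A (Python) =====
-- import itertools as it
--
-- def repeat(lst, n):
--     return list(it.chain(*it.repeat(lst,n)))
--
-- def subslots(slot):
--     if (slot % 5) < 4:
--         return range(3)
--     else:
--         return range(6)
--
-- def superlayer(crate,slot,subslot):
--
--     if crate < 2:
--         slyr = repeat((0,1),9)
--     elif slot < 5:
--         slyr = repeat((2,3),9)
--     else:
--         slyr = repeat((4,5),9)
--
--     i = sum(len(subslots(s)) for s in range(slot))
--     i += subslot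
--     return slyr[i % 18]
-- ===== SOURCE B (Python) =====
-- def superlayer(crate, slot, subslot):
--     if crate < 2:
--         base = 0
--     elif slot < 5:
--         base = 2
--     else:
--         base = 4
--     s = max(slot, 0)
--     i = 3 * s + 3 * (s // 5) + subslot
--     return base + i % 2
-- ===== Notes on version B (the rewrite author's own statement) =====
-- stated objective: faster
-- what changed: Replaces the 18-entry repeated lookup table and the O(slot) sum over range(slot) by a closed-form index i = 3*s + 3*(s//5) + subslot (s = max(slot,0)) and returns base + i % 2 directly, using that the table alternates base/base+1.
import Mathlib
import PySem

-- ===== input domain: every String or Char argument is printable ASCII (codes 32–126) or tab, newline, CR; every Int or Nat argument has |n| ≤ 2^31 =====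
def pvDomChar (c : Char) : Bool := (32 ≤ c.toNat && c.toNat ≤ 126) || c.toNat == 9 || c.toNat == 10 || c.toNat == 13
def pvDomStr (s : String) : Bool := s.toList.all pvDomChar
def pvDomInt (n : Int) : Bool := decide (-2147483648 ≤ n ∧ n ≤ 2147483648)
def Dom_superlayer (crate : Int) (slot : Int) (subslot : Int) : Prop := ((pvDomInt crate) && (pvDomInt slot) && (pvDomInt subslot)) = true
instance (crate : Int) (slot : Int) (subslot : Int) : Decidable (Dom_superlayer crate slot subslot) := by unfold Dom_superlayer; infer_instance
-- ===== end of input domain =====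

-- B replaces A's O(slot) sum over range(slot) and 18-entry lookup table by a closed-form O(1) index formula.

-- ===== PORT A =====
-- repeat(lst, n) = list(it.chain(*it.repeat(lst, n)))
def pvRepeat (lst : List Int) (n : Nat) : List Int := (List.replicate n lst).flatten

-- subslots(slot): range(3) if slot % 5 < 4 else range(6)
def pvSubslots (slot : Int) : List Int :=
  if PySem.Int.mod slot 5 < 4 then PySem.List.pyRange 0 3 1 else PySem.List.pyRange 0 6 1

def superlayer (crate : Int) (slot : Int) (subslot : Int) : Int :=
  let slyr : List Int :=
    if crate < 2 then pvRepeat [0, 1] 9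
    else if slot < 5 then pvRepeat [2, 3] 9
    else pvRepeat [4, 5] 9
  let i : Int := (PySem.List.pyRange 0 slot 1).foldl
    (fun acc s => acc + ((pvSubslots s).length : Int)) 0
  let i := i + subslot
  -- slyr[i % 18]: the index i % 18 is always in [0, 18) so the lookup never raises; getD 0 is never used
  (PySem.List.pyGet? slyr (PySem.Int.mod i 18)).getD 0

-- ===== PORT B =====
def superlayer_alt (crate : Int) (slot : Int) (subslot : Int) : Int :=
  let base : Int :=
    if crate < 2 then 0
    else if slot < 5 then 2
    else 4
  let s : Int := max slot 0
  let i : Int := 3 * s + 3 * PySem.Int.floordiv s 5 + subslot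
  base + PySem.Int.mod i 2

-- ===== PRECONDITION & SPEC =====
def Spec_superlayer (crate : Int) (slot : Int) (subslot : Int) (out : Int) : Prop := out = superlayer_alt crate slot subslot
instance (crate : Int) (slot : Int) (subslot : Int) (out : Int) : Decidable (Spec_superlayer crate slot subslot out) := by unfold Spec_superlayer; infer_instance

-- ===== CLAIM (what is proved, stated in full; the proofs are below) =====
def Claim_equal_superlayer : Prop := ∀ (crate : Int) (slot : Int) (subslot : Int), Dom_superlayer crate slot subslot → Spec_superlayer crate slot subslot (superlayer crate slot subslot)

-- ===== LEMMAS AND PROOFS =====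

-- A's sum over range(n) of len(subslots(s)) equals 3n + 3*(n/5)
theorem pvSum_eq (n : Nat) :
    (PySem.List.pyRange 0 (n : Int) 1).foldl
      (fun acc s => acc + ((pvSubslots s).length : Int)) 0
    = 3 * (n : Int) + 3 * ((n / 5 : Nat) : Int) := by
  induction n with
  | zero => simp [PySem.List.pyRange_one_eq_nil]
  | succ n ih =>
      have h1 : ((n + 1 : Nat) : Int) = (n : Int) + 1 := by push_cast; ring
      rw [h1, PySem.List.pyRange_one_succ_right (by positivity), List.foldl_append]
      have hlen : ((pvSubslots (n : Int)).length : Int)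
          = if n % 5 < 4 then 3 else 6 := by
        unfold pvSubslots
        have hm : PySem.Int.mod (n : Int) 5 = ((n % 5 : Nat) : Int) := by
          exact_mod_cast PySem.Int.mod_natCast n 5
        rw [hm]
        by_cases h : n % 5 < 4
        · rw [if_pos (by exact_mod_cast h), if_pos h]; decide
        · rw [if_neg (by omega), if_neg h]; decide
      simp only [List.foldl_cons, List.foldl_nil, ih, hlen]
      by_cases h : n % 5 < 4
      · have hd : (n + 1) / 5 = n / 5 := by omega
        simp [h, hd]; ring
      · have hd : (n + 1) / 5 = n / 5 + 1 := by omega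
        simp [h, hd]; ring

-- lookup in the alternating table [b, b+1, b, b+1, …] (length 18) at index j ∈ [0,18)
theorem pvLookup (b : Int) (j : Int) (h0 : 0 ≤ j) (h1 : j < 18) :
    (PySem.List.pyGet? (pvRepeat [b, b + 1] 9) j).getD 0 = b + PySem.Int.mod j 2 := by
  have hmod : PySem.Int.mod j 2 = j % 2 := PySem.Int.mod_eq_emod_of_pos (by norm_num)
  rw [hmod]
  interval_cases j <;>
    simp [pvRepeat, List.replicate, PySem.List.pyGet?, PySem.List.pyIdx?]

-- the two index expressions coincide
theorem pvIdx_eq (slot subslot : Int) :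
    (PySem.List.pyRange 0 slot 1).foldl
      (fun acc s => acc + ((pvSubslots s).length : Int)) 0 + subslot
    = 3 * max slot 0 + 3 * PySem.Int.floordiv (max slot 0) 5 + subslot := by
  rcases le_or_gt slot 0 with h | h
  · rw [PySem.List.pyRange_one_eq_nil h]
    have : max slot 0 = 0 := by omega
    simp [this, PySem.Int.floordiv]
  · have hn : slot = ((slot.toNat : Nat) : Int) := by omega
    have hmax : max slot 0 = slot := by omega
    have hf : PySem.Int.floordiv ((slot.toNat : Nat) : Int) 5 = ((slot.toNat / 5 : Nat) : Int) := by
      exact_mod_cast PySem.Int.floordiv_natCast slot.toNat 5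
    rw [hmax, hn, pvSum_eq, hf]

theorem pvMod18_2 (i : Int) : PySem.Int.mod (PySem.Int.mod i 18) 2 = PySem.Int.mod i 2 := by
  rw [PySem.Int.mod_eq_emod_of_pos (a := i) (by norm_num : (0:Int) < 18),
      PySem.Int.mod_eq_emod_of_pos (by norm_num : (0:Int) < 2),
      PySem.Int.mod_eq_emod_of_pos (by norm_num : (0:Int) < 2)]
  exact Int.emod_emod_of_dvd i (by norm_num)

-- ===== VERDICT (by name: the statement is the Claim_ definition above) =====
theorem superlayer_spec : Claim_equal_superlayer := by
  intro crate slot subslot _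
  unfold Spec_superlayer superlayer superlayer_alt
  simp only []
  set i : Int := (PySem.List.pyRange 0 slot 1).foldl
    (fun acc s => acc + ((pvSubslots s).length : Int)) 0 + subslot with hi
  have hkey : ∀ b : Int,
      (PySem.List.pyGet? (pvRepeat [b, b + 1] 9) (PySem.Int.mod i 18)).getD 0
      = b + PySem.Int.mod (3 * max slot 0 + 3 * PySem.Int.floordiv (max slot 0) 5 + subslot) 2 := by
    intro b
    rw [pvLookup b _ (PySem.Int.mod_nonneg i (by norm_num)) (PySem.Int.mod_lt i (by norm_num)),
        pvMod18_2, hi, pvIdx_eq]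
  by_cases h1 : crate < 2
  · simpa [h1] using hkey 0
  · by_cases h2 : slot < 5
    · have := hkey 2
      norm_num at this
      simp [h1, h2, this]
    · have := hkey 4
      norm_num at this
      simp [h1, h2, this]
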